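-- pv_equiv track=rewrite | github.com/und-dream-lab/rawkee | rawkee/io/RKLoadSceneFromFile.py | _tokenizeClassic
-- ===== SOURCE A (Python) =====
-- def _tokenizeClassic(text):
--     """
--     Tokenize an X3D Classic (VRML) source into a flat token list.
--
--     Rules:
--       - # to end-of-line is a comment and is discarded.
--       - Quoted strings (including their delimiters) become single tokens.
--       - Commas and whitespace are discarded.
--       - [ ] { } each become individual tokens.
--     """
--     tokens = []
--     i = 0
--     n = len(text)
--     while i < n:
--         c = text[i]
--         if c == '#':                        # line comment
--             while i < n and text[i] != '\n':
--                 i += 1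
--         elif c == '"':                      # quoted string (single token)
--             j = i + 1
--             while j < n:
--                 if text[j] == '\\':
--                     j += 2
--                     continue
--                 if text[j] == '"':
--                     j += 1
--                     break
--                 j += 1
--             tokens.append(text[i:j])
--             i = j
--         elif c in ' \t\r\n,':              # whitespace / comma
--             i += 1
--         elif c in '[]{}':                  # structural characters
--             tokens.append(c)
--             i += 1
--         else:                              # bare identifier or number
--             j = i
--             while j < n and text[j] not in ' \t\r\n,[]{}#"':
--                 j += 1
--             tokens.append(text[i:j])
--             i = j
--     return tokens
-- ===== SOURCE B (Python) =====
-- def _tokenizeClassic(text):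
--     """Single-pass character-driven state machine (DFA) tokenizer."""
--     NORMAL, COMMENT, STRING, ESCAPE, BARE = range(5)
--     tokens = []
--     buf = []
--     state = NORMAL
--     for ch in text:
--         if state == COMMENT:
--             if ch == '\n':
--                 state = NORMAL
--             continue
--         if state == STRING:
--             buf.append(ch)
--             if ch == '\\':
--                 state = ESCAPE
--             elif ch == '"':
--                 tokens.append(''.join(buf))
--                 buf = []
--                 state = NORMAL
--             continue
--         if state == ESCAPE:
--             buf.append(ch)
--             state = STRING
--             continue
--         if state == BARE:
--             if ch not in ' \t\r\n,[]{}#"':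
--                 buf.append(ch)
--                 continue
--             tokens.append(''.join(buf))
--             buf = []
--             state = NORMAL
--             # fall through: ch is handled in NORMAL below
--         if ch == '#':
--             state = COMMENT
--         elif ch == '"':
--             buf.append(ch)
--             state = STRING
--         elif ch in ' \t\r\n,':
--             pass
--         elif ch in '[]{}':
--             tokens.append(ch)
--         else:
--             buf.append(ch)
--             state = BARE
--     if state in (STRING, ESCAPE, BARE):
--         tokens.append(''.join(buf))
--     return tokens
-- ===== Notes on version B (the rewrite author's own statement) =====
-- stated objective: alternative
-- what changed: Replaced A's index-jumping while-loop with inner scanning loops and slicing by a single forward fold over the characters driven by an explicit 5-state DFA (normal/comment/string/escape/bare) with a token buffer.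
import Mathlib
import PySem

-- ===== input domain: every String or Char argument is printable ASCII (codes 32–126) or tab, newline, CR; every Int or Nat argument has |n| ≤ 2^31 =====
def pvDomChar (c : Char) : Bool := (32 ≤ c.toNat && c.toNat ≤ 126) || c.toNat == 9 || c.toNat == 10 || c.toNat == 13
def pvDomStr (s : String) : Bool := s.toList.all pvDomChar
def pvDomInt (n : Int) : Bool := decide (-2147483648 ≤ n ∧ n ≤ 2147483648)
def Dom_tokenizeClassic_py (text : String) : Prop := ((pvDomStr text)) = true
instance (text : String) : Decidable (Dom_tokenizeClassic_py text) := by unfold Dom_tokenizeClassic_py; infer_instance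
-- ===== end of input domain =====

-- B replaces A's index-jumping scan (inner while-loops + slicing) by a one-pass
-- explicit-state (DFA) fold with a token buffer; objective: alternative (same O(n) cost).

-- ===== PORT A =====
-- membership tests 'c in " \t\r\n,"', 'c in "[]{}"', 'c in " \t\r\n,[]{}#\""' as disjunctions
def pvIsWsA (c : Char) : Bool := c == ' ' || c == '\t' || c == '\r' || c == '\n' || c == ','
def pvIsStructA (c : Char) : Bool := c == '[' || c == ']' || c == '{' || c == '}'
def pvIsDelimA (c : Char) : Bool :=
  c == '#' || c == '"' ||
  c == ' ' || c == '\t' || c == '\r' || c == '\n' || c == ',' ||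
  c == '[' || c == ']' || c == '{' || c == '}'

-- inner 'while i < n and text[i] != '\n'' of the comment branch
def pvSkipCommentA (cs : List Char) (n i : Nat) : Nat :=
  if _h : i < n then
    if cs.getD i ' ' ≠ '\n' then pvSkipCommentA cs n (i + 1) else i
  else i
termination_by n - i

-- inner 'while j < n: …' of the quoted-string branch
def pvScanStringA (cs : List Char) (n j : Nat) : Nat :=
  if _h : j < n then
    if cs.getD j ' ' == '\\' then pvScanStringA cs n (j + 2)
    else if cs.getD j ' ' == '"' then j + 1
    else pvScanStringA cs n (j + 1)
  else j
termination_by n - j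

-- inner 'while j < n and text[j] not in …' of the bare-token branch
def pvScanBareA (cs : List Char) (n j : Nat) : Nat :=
  if _h : j < n then
    if ¬ pvIsDelimA (cs.getD j ' ') then pvScanBareA cs n (j + 1) else j
  else j
termination_by n - j

-- lower bounds, needed by pvLoopA's termination proof
theorem pvSkipCommentA_ge (cs : List Char) (n i : Nat) : i ≤ pvSkipCommentA cs n i := by
  unfold pvSkipCommentA
  split
  · split
    · have := pvSkipCommentA_ge cs n (i + 1); omega
    · exact Nat.le_refl i
  · exact Nat.le_refl i
termination_by n - i

theorem pvScanStringA_ge (cs : List Char) (n j : Nat) : j ≤ pvScanStringA cs n j := by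
  unfold pvScanStringA
  split
  · split
    · have := pvScanStringA_ge cs n (j + 2); omega
    · split
      · omega
      · have := pvScanStringA_ge cs n (j + 1); omega
  · exact Nat.le_refl j
termination_by n - j

theorem pvScanBareA_ge (cs : List Char) (n j : Nat) : j ≤ pvScanBareA cs n j := by
  unfold pvScanBareA
  split
  · split
    · have := pvScanBareA_ge cs n (j + 1); omega
    · exact Nat.le_refl j
  · exact Nat.le_refl j
termination_by n - j

-- the outer 'while i < n' loop of A
def pvLoopA (cs : List Char) (n i : Nat) (tokens : List String) : List String :=
  if h : i < n then
    let c := cs.getD i ' '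
    if hc : c == '#' then
      pvLoopA cs n (pvSkipCommentA cs n i) tokens
    else if c == '"' then
      let j := pvScanStringA cs n (i + 1)
      pvLoopA cs n j (tokens ++ [String.mk ((cs.drop i).take (j - i))])
    else if pvIsWsA c then
      pvLoopA cs n (i + 1) tokens
    else if hst : pvIsStructA c then
      pvLoopA cs n (i + 1) (tokens ++ [String.mk [c]])
    else
      let j := pvScanBareA cs n i
      pvLoopA cs n j (tokens ++ [String.mk ((cs.drop i).take (j - i))])
  else tokens
termination_by n - i
decreasing_by
  · have hg : cs.getD i ' ' = '#' := by simpa using hc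
    have h1 : pvSkipCommentA cs n i = pvSkipCommentA cs n (i + 1) := by
      rw [pvSkipCommentA, dif_pos h, if_pos (by rw [hg]; decide)]
    have h2 := pvSkipCommentA_ge cs n (i + 1)
    omega
  · have := pvScanStringA_ge cs n (i + 1); omega
  · omega
  · omega
  · rename_i hq hw
    have hc' : ¬ cs.getD i ' ' = '#' := by simpa using hc
    have hq' : ¬ cs.getD i ' ' = '"' := by simpa using hq
    have hw' : ¬ pvIsWsA (cs.getD i ' ') = true := by simpa using hw
    have hst' : ¬ pvIsStructA (cs.getD i ' ') = true := by simpa using hst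
    have hd : ¬ pvIsDelimA (cs.getD i ' ') = true := by
      simp only [pvIsDelimA, pvIsWsA, pvIsStructA, Bool.or_eq_true, beq_iff_eq] at hw' hst' ⊢
      tauto
    have h1 : pvScanBareA cs n i = pvScanBareA cs n (i + 1) := by
      rw [pvScanBareA, dif_pos h, if_pos hd]
    have h2 := pvScanBareA_ge cs n (i + 1)
    omega

def tokenizeClassic_py (text : String) : List String :=
  pvLoopA text.toList text.toList.length 0 []

-- ===== PORT B =====
inductive PvSt where
  | normal | comment | string | escape | bare
deriving DecidableEq, Repr

def pvIsWsB (c : Char) : Bool := c == ' ' || c == '\t' || c == '\r' || c == '\n' || c == ','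
def pvIsStructB (c : Char) : Bool := c == '[' || c == ']' || c == '{' || c == '}'
def pvIsBreakB (c : Char) : Bool :=
  c == '#' || c == '"' ||
  c == ' ' || c == '\t' || c == '\r' || c == '\n' || c == ',' ||
  c == '[' || c == ']' || c == '{' || c == '}'

-- NORMAL-state dispatch on one character
def pvNormalB (toks : List String) (buf : List Char) (ch : Char) :
    List String × PvSt × List Char :=
  if ch == '#' then (toks, .comment, buf)
  else if ch == '"' then (toks, .string, buf ++ [ch])
  else if pvIsWsB ch then (toks, .normal, buf)
  else if pvIsStructB ch then (toks ++ [String.mk [ch]], .normal, buf)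
  else (toks, .bare, buf ++ [ch])

-- one DFA transition
def pvStepB (s : List String × PvSt × List Char) (ch : Char) :
    List String × PvSt × List Char :=
  match s with
  | (toks, .comment, buf) => if ch == '\n' then (toks, .normal, buf) else (toks, .comment, buf)
  | (toks, .string, buf) =>
      if ch == '\\' then (toks, .escape, buf ++ [ch])
      else if ch == '"' then (toks ++ [String.mk (buf ++ [ch])], .normal, [])
      else (toks, .string, buf ++ [ch])
  | (toks, .escape, buf) => (toks, .string, buf ++ [ch])
  | (toks, .bare, buf) =>
      if ¬ pvIsBreakB ch then (toks, .bare, buf ++ [ch])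
      else pvNormalB (toks ++ [String.mk buf]) [] ch
  | (toks, .normal, buf) => pvNormalB toks buf ch

-- flush a pending string/bare token at end of input
def pvFinishB (s : List String × PvSt × List Char) : List String :=
  match s with
  | (toks, st, buf) =>
      if st = .string ∨ st = .escape ∨ st = .bare then toks ++ [String.mk buf] else toks

def tokenizeClassic_py_alt (text : String) : List String :=
  pvFinishB (text.toList.foldl pvStepB ([], .normal, []))

-- ===== PRECONDITION & SPEC =====
def Spec_tokenizeClassic_py (text : String) (out : List String) : Prop := out = tokenizeClassic_py_alt text
instance (text : String) (out : List String) : Decidable (Spec_tokenizeClassic_py text out) := by unfold Spec_tokenizeClassic_py; infer_instance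

-- ===== CLAIM (what is proved, stated in full; the proofs are below) =====
def Claim_equal_tokenizeClassic_py : Prop := ∀ (text : String), Dom_tokenizeClassic_py text → Spec_tokenizeClassic_py text (tokenizeClassic_py text)

-- ===== LEMMAS AND PROOFS =====

-- generic takeWhile/dropWhile bridges
theorem pvDropTW {α : Type} (p : α → Bool) (l : List α) :
    l.drop (l.takeWhile p).length = l.dropWhile p := by
  induction l with
  | nil => simp
  | cons a l ih =>
    by_cases hp : p a <;> simp [List.takeWhile_cons, List.dropWhile_cons, hp, ih]

theorem pvTakeTW {α : Type} (p : α → Bool) (l : List α) :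
    l.take (l.takeWhile p).length = l.takeWhile p := by
  induction l with
  | nil => simp
  | cons a l ih =>
    by_cases hp : p a <;> simp [List.takeWhile_cons, hp, ih]

theorem pvTakeApp {α : Type} (l1 l2 : List α) : (l1 ++ l2).take l1.length = l1 := by
  induction l1 with
  | nil => simp
  | cons a t ih => simp [ih]

theorem pvHeadDW {α : Type} (p : α → Bool) (l : List α) (d : α) (r : List α)
    (h : l.dropWhile p = d :: r) : p d = false := by
  induction l with
  | nil => simp at h
  | cons a l ih =>
    by_cases hp : p a
    · exact ih (by simpa [List.dropWhile_cons, hp] using h)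
    · rw [List.dropWhile_cons, if_neg (by simp [hp])] at h
      cases h
      simpa using hp

theorem pvTWofDWnil {α : Type} (p : α → Bool) (l : List α)
    (h : l.dropWhile p = []) : l.takeWhile p = l := by
  have := List.takeWhile_append_dropWhile (p := p) (l := l)
  rw [h] at this
  simpa using this

-- getD/getElem bridges
theorem pvGetD (cs : List Char) (i : Nat) (h : i < cs.length) :
    cs.getD i ' ' = cs[i] := by
  simp [List.getD, List.getElem?_eq_getElem, h]

theorem pvGetD' (cs : List Char) (i : Nat) (h : i < cs.length) :
    cs[i]?.getD ' ' = cs[i] := by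
  simp [List.getElem?_eq_getElem, h]

-- index specs for A's inner loops
theorem pvSkipCommentA_spec (cs : List Char) (i : Nat) :
    pvSkipCommentA cs cs.length i
      = i + ((cs.drop i).takeWhile (fun c => c != '\n')).length := by
  rw [pvSkipCommentA]
  by_cases h : i < cs.length
  · have hdrop : cs.drop i = cs[i] :: cs.drop (i + 1) := List.drop_eq_getElem_cons h
    by_cases hne : cs[i] = '\n'
    · rw [dif_pos h, if_neg (by simp [pvGetD cs i h, pvGetD' cs i h, hne])]
      rw [hdrop, List.takeWhile_cons, if_neg (by simp [hne])]
      simp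
    · rw [dif_pos h, if_pos (by simp [pvGetD cs i h, pvGetD' cs i h, hne])]
      rw [pvSkipCommentA_spec cs (i + 1), hdrop, List.takeWhile_cons, if_pos (by simp [hne])]
      simp
      omega
  · have hnil : cs.drop i = [] := by rw [List.drop_eq_nil_iff]; omega
    rw [dif_neg h, hnil]
    simp
termination_by cs.length - i

theorem pvScanBareA_spec (cs : List Char) (i : Nat) :
    pvScanBareA cs cs.length i
      = i + ((cs.drop i).takeWhile (fun c => !pvIsDelimA c)).length := by
  rw [pvScanBareA]
  by_cases h : i < cs.length
  · have hdrop : cs.drop i = cs[i] :: cs.drop (i + 1) := List.drop_eq_getElem_cons h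
    by_cases hne : pvIsDelimA cs[i] = true
    · rw [dif_pos h, if_neg (by simp [pvGetD cs i h, pvGetD' cs i h, hne])]
      rw [hdrop, List.takeWhile_cons, if_neg (by simp [hne])]
      simp
    · have hne' : pvIsDelimA cs[i] = false := Bool.eq_false_iff.mpr hne
      rw [dif_pos h, if_pos (by simp [pvGetD cs i h, pvGetD' cs i h, hne'])]
      rw [pvScanBareA_spec cs (i + 1), hdrop, List.takeWhile_cons, if_pos (by simp [hne'])]
      simp
      omega
  · have hnil : cs.drop i = [] := by rw [List.drop_eq_nil_iff]; omega
    rw [dif_neg h, hnil]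
    simp
termination_by cs.length - i

-- list-level view of the quoted-string scan: (token chars after the opening quote, rest if closed)
def pvStrScan : List Char → List Char × Option (List Char)
  | [] => ([], none)
  | c :: r =>
    if c == '\\' then
      match r with
      | [] => ([c], none)
      | d :: r' =>
        let p := pvStrScan r'
        (c :: d :: p.1, p.2)
    else if c == '"' then ([c], some r)
    else
      let p := pvStrScan r
      (c :: p.1, p.2)

theorem pvStrScan_bs_nil : pvStrScan ['\\'] = (['\\'], none) := by
  simp [pvStrScan]

theorem pvStrScan_bs (d : Char) (r' : List Char) :
    pvStrScan ('\\' :: d :: r') = ('\\' :: d :: (pvStrScan r').1, (pvStrScan r').2) := by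
  simp [pvStrScan]

theorem pvStrScan_quote (r : List Char) : pvStrScan ('"' :: r) = (['"'], some r) := by
  cases r <;> simp [pvStrScan]

theorem pvStrScan_other (c : Char) (r : List Char) (h1 : ¬ c = '\\') (h2 : ¬ c = '"') :
    pvStrScan (c :: r) = (c :: (pvStrScan r).1, (pvStrScan r).2) := by
  cases r <;> simp [pvStrScan, h1, h2]

theorem pvScanStringA_spec (cs : List Char) (s : Nat) (hs : s ≤ cs.length) :
    (∀ tk rest, pvStrScan (cs.drop s) = (tk, some rest) →
        pvScanStringA cs cs.length s = s + tk.length ∧ tk ++ rest = cs.drop s) ∧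
    (∀ tk, pvStrScan (cs.drop s) = (tk, none) →
        cs.length ≤ pvScanStringA cs cs.length s ∧ tk = cs.drop s) := by
  by_cases h : s < cs.length
  · have hdrop : cs.drop s = cs[s] :: cs.drop (s + 1) := List.drop_eq_getElem_cons h
    by_cases hbs : cs[s] = '\\'
    · rcases hr : cs.drop (s + 1) with _ | ⟨d, r'⟩
      · -- lone trailing backslash
        have hlen : cs.length ≤ s + 1 := by
          have := List.drop_eq_nil_iff.mp hr; omega
        have hscan : pvScanStringA cs cs.length s = s + 2 := by
          rw [pvScanStringA, dif_pos h, if_pos (by simp [pvGetD cs s h, pvGetD' cs s h, hbs])]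
          rw [pvScanStringA, dif_neg (by omega)]
        have hss : pvStrScan (cs.drop s) = (['\\'], none) := by
          rw [hdrop, hr, hbs, pvStrScan_bs_nil]
        constructor
        · intro tk rest heq
          rw [hss] at heq
          injection heq with h1 h2
          simp at h2
        · intro tk heq
          rw [hss] at heq
          injection heq with h1 h2
          subst h1
          refine ⟨by rw [hscan]; omega, ?_⟩
          rw [hdrop, hr, hbs]
      · -- escaped pair, recurse at s+2
        have hs1 : s + 1 < cs.length := by
          by_contra hcon
          rw [List.drop_eq_nil_iff.mpr (by omega)] at hr
          cases hr
        have hr' : cs.drop (s + 2) = r' := by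
          have h2 : cs.drop (s + 1) = cs[s + 1] :: cs.drop (s + 2) := List.drop_eq_getElem_cons hs1
          rw [hr] at h2
          injection h2 with _ h3
          exact h3.symm
        have hscan : pvScanStringA cs cs.length s = pvScanStringA cs cs.length (s + 2) := by
          rw [pvScanStringA, dif_pos h, if_pos (by simp [pvGetD cs s h, pvGetD' cs s h, hbs])]
        obtain ⟨IH1, IH2⟩ := pvScanStringA_spec cs (s + 2) (by omega)
        have hss : pvStrScan (cs.drop s) = ('\\' :: d :: (pvStrScan r').1, (pvStrScan r').2) := by
          rw [hdrop, hr, hbs, pvStrScan_bs]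
        constructor
        · intro tk rest heq
          rw [hss] at heq
          rcases hp : pvStrScan r' with ⟨tk', o'⟩
          rw [hp] at heq
          injection heq with h1 h2
          subst h1
          subst h2
          obtain ⟨hA2, hB2⟩ := IH1 tk' rest (by rw [hr', hp])
          constructor
          · rw [hscan, hA2]; simp; omega
          · rw [hr'] at hB2
            rw [hdrop, hr, hbs]
            simp [hB2]
        · intro tk heq
          rw [hss] at heq
          rcases hp : pvStrScan r' with ⟨tk', o'⟩
          rw [hp] at heq
          injection heq with h1 h2
          subst h1
          subst h2
          obtain ⟨hA2, hB2⟩ := IH2 tk' (by rw [hr', hp])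
          constructor
          · rw [hscan]; omega
          · rw [hr'] at hB2
            rw [hdrop, hr, hbs]
            simp [hB2]
    · by_cases hq : cs[s] = '"'
      · have hscan : pvScanStringA cs cs.length s = s + 1 := by
          rw [pvScanStringA, dif_pos h, if_neg (by simp [pvGetD cs s h, pvGetD' cs s h, hbs]),
            if_pos (by simp [pvGetD cs s h, pvGetD' cs s h, hq])]
        have hss : pvStrScan (cs.drop s) = (['"'], some (cs.drop (s + 1))) := by
          rw [hdrop, hq, pvStrScan_quote]
        constructor
        · intro tk rest heq
          rw [hss] at heq
          injection heq with h1 h2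
          injection h2 with h2
          subst h1
          subst h2
          refine ⟨by rw [hscan]; simp, ?_⟩
          rw [hdrop, hq]
          simp
        · intro tk heq
          rw [hss] at heq
          injection heq with h1 h2
          simp at h2
      · have hscan : pvScanStringA cs cs.length s = pvScanStringA cs cs.length (s + 1) := by
          rw [pvScanStringA, dif_pos h, if_neg (by simp [pvGetD cs s h, pvGetD' cs s h, hbs]),
            if_neg (by simp [pvGetD cs s h, pvGetD' cs s h, hq])]
        obtain ⟨IH1, IH2⟩ := pvScanStringA_spec cs (s + 1) (by omega)
        have hss : pvStrScan (cs.drop s) =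
            (cs[s] :: (pvStrScan (cs.drop (s + 1))).1, (pvStrScan (cs.drop (s + 1))).2) := by
          rw [hdrop, pvStrScan_other cs[s] (cs.drop (s + 1)) hbs hq]
        constructor
        · intro tk rest heq
          rw [hss] at heq
          rcases hp : pvStrScan (cs.drop (s + 1)) with ⟨tk', o'⟩
          rw [hp] at heq
          injection heq with h1 h2
          subst h1
          subst h2
          obtain ⟨hA2, hB2⟩ := IH1 tk' rest hp
          constructor
          · rw [hscan, hA2]; simp; omega
          · rw [hdrop]
            simp [hB2]
        · intro tk heq
          rw [hss] at heq
          rcases hp : pvStrScan (cs.drop (s + 1)) with ⟨tk', o'⟩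
          rw [hp] at heq
          injection heq with h1 h2
          subst h1
          subst h2
          obtain ⟨hA2, hB2⟩ := IH2 tk' hp
          constructor
          · rw [hscan]; omega
          · rw [hdrop]
            simp [hB2]
  · have hnil : cs.drop s = [] := by rw [List.drop_eq_nil_iff]; omega
    have hscan : pvScanStringA cs cs.length s = s := by
      rw [pvScanStringA, dif_neg h]
    constructor
    · intro tk rest heq
      rw [hnil] at heq
      have heq' : (([], none) : List Char × Option (List Char)) = (tk, some rest) := heq
      injection heq' with h1 h2
      simp at h2
    · intro tk heq
      rw [hnil] at heq
      have heq' : (([], none) : List Char × Option (List Char)) = (tk, none) := heq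
      injection heq' with h1 h2
      subst h1
      exact ⟨by rw [hscan]; omega, by rw [hnil]⟩
termination_by cs.length - s

-- B's fold through a comment
theorem pvCommentFold (l : List Char) (toks : List String) (buf : List Char) :
    l.foldl pvStepB (toks, .comment, buf) =
      (match l.dropWhile (fun c => c != '\n') with
       | [] => (toks, PvSt.comment, buf)
       | _ :: r => r.foldl pvStepB (toks, PvSt.normal, buf)) := by
  induction l with
  | nil => simp
  | cons c r ih =>
    by_cases hc : c = '\n'
    · subst hc
      rw [List.foldl_cons,
        show pvStepB (toks, PvSt.comment, buf) '\n' = (toks, PvSt.normal, buf) from by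
          simp [pvStepB],
        List.dropWhile_cons, if_neg (by simp)]
    · rw [List.foldl_cons,
        show pvStepB (toks, PvSt.comment, buf) c = (toks, PvSt.comment, buf) from by
          simp [pvStepB, hc],
        List.dropWhile_cons, if_pos (by simp [hc])]
      exact ih

-- B's fold through a bare token
theorem pvBareFold (l : List Char) :
    ∀ (toks : List String) (buf : List Char),
    (match l.dropWhile (fun c => !pvIsBreakB c) with
     | [] => pvFinishB (l.foldl pvStepB (toks, .bare, buf)) = toks ++ [String.mk (buf ++ l)]
     | d :: r => l.foldl pvStepB (toks, .bare, buf) =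
         (d :: r).foldl pvStepB
           (toks ++ [String.mk (buf ++ l.takeWhile (fun c => !pvIsBreakB c))], .normal, [])) := by
  induction l with
  | nil => intro toks buf; simp [pvFinishB]
  | cons c r ih =>
    intro toks buf
    by_cases hb : pvIsBreakB c = true
    · rw [List.dropWhile_cons, if_neg (by simp [hb]), List.takeWhile_cons, if_neg (by simp [hb])]
      simp only [List.foldl_cons]
      rw [show pvStepB (toks, PvSt.bare, buf) c = pvNormalB (toks ++ [String.mk buf]) [] c from by
        simp [pvStepB, hb]]
      simp [pvStepB]
    · rw [List.dropWhile_cons, if_pos (by simp [hb]), List.takeWhile_cons, if_pos (by simp [hb])]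
      simp only [List.foldl_cons]
      rw [show pvStepB (toks, PvSt.bare, buf) c = (toks, PvSt.bare, buf ++ [c]) from by
        simp [pvStepB, hb]]
      have hih := ih toks (buf ++ [c])
      rcases hdw : r.dropWhile (fun c => !pvIsBreakB c) with _ | ⟨d, r'⟩ <;> rw [hdw] at hih
      · have hih' : pvFinishB (r.foldl pvStepB (toks, PvSt.bare, buf ++ [c]))
            = toks ++ [String.mk ((buf ++ [c]) ++ r)] := hih
        simpa using hih'
      · have hih' : r.foldl pvStepB (toks, PvSt.bare, buf ++ [c])
            = (d :: r').foldl pvStepB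
                (toks ++ [String.mk ((buf ++ [c]) ++ r.takeWhile (fun c => !pvIsBreakB c))],
                  PvSt.normal, []) := hih
        simpa using hih'

-- B's fold through a quoted string (induction on a length bound)
theorem pvStringFold (N : Nat) :
    ∀ (l : List Char), l.length ≤ N → ∀ (toks : List String) (buf : List Char),
    (∀ tk rest, pvStrScan l = (tk, some rest) →
        l.foldl pvStepB (toks, .string, buf) =
          rest.foldl pvStepB (toks ++ [String.mk (buf ++ tk)], .normal, [])) ∧
    (∀ tk, pvStrScan l = (tk, none) →
        pvFinishB (l.foldl pvStepB (toks, .string, buf)) = toks ++ [String.mk (buf ++ tk)]) := by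
  induction N with
  | zero =>
    intro l hl toks buf
    rcases l with _ | ⟨c, r⟩
    · constructor
      · intro tk rest heq
        have heq' : (([], none) : List Char × Option (List Char)) = (tk, some rest) := heq
        injection heq' with h1 h2
        simp at h2
      · intro tk heq
        have heq' : (([], none) : List Char × Option (List Char)) = (tk, none) := heq
        injection heq' with h1 h2
        subst h1
        simp [pvFinishB]
    · simp at hl
  | succ N ihN =>
    intro l hl toks buf
    rcases l with _ | ⟨c, r⟩
    · constructor
      · intro tk rest heq
        have heq' : (([], none) : List Char × Option (List Char)) = (tk, some rest) := heq
        injection heq' with h1 h2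
        simp at h2
      · intro tk heq
        have heq' : (([], none) : List Char × Option (List Char)) = (tk, none) := heq
        injection heq' with h1 h2
        subst h1
        simp [pvFinishB]
    · by_cases hbs : c = '\\'
      · subst hbs
        rcases r with _ | ⟨d, r'⟩
        · constructor
          · intro tk rest heq
            rw [pvStrScan_bs_nil] at heq
            injection heq with h1 h2
            simp at h2
          · intro tk heq
            rw [pvStrScan_bs_nil] at heq
            injection heq with h1 h2
            subst h1
            simp [pvStepB, pvFinishB]
        · have hrl : r'.length ≤ N := by simp at hl; omega
          obtain ⟨IH1, IH2⟩ := ihN r' hrl toks (buf ++ ['\\', d])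
          have hfold : ('\\' :: d :: r').foldl pvStepB (toks, .string, buf) =
              r'.foldl pvStepB (toks, .string, buf ++ ['\\', d]) := by
            simp [pvStepB]
          constructor
          · intro tk rest heq
            rw [pvStrScan_bs] at heq
            rcases hp : pvStrScan r' with ⟨tk', o'⟩
            rw [hp] at heq
            injection heq with h1 h2
            subst h1
            subst h2
            rw [hfold, IH1 tk' rest hp]
            simp
          · intro tk heq
            rw [pvStrScan_bs] at heq
            rcases hp : pvStrScan r' with ⟨tk', o'⟩
            rw [hp] at heq
            injection heq with h1 h2
            subst h1
            subst h2
            rw [hfold, IH2 tk' hp]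
            simp
      · by_cases hq : c = '"'
        · subst hq
          constructor
          · intro tk rest heq
            rw [pvStrScan_quote] at heq
            injection heq with h1 h2
            injection h2 with h2
            subst h1
            subst h2
            simp [pvStepB]
          · intro tk heq
            rw [pvStrScan_quote] at heq
            injection heq with h1 h2
            simp at h2
        · have hrl : r.length ≤ N := by simp at hl; omega
          obtain ⟨IH1, IH2⟩ := ihN r hrl toks (buf ++ [c])
          have hfold : (c :: r).foldl pvStepB (toks, .string, buf) =
              r.foldl pvStepB (toks, .string, buf ++ [c]) := by
            simp [pvStepB, hbs, hq]
          constructor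
          · intro tk rest heq
            rw [pvStrScan_other c r hbs hq] at heq
            rcases hp : pvStrScan r with ⟨tk', o'⟩
            rw [hp] at heq
            injection heq with h1 h2
            subst h1
            subst h2
            rw [hfold, IH1 tk' rest hp]
            simp
          · intro tk heq
            rw [pvStrScan_other c r hbs hq] at heq
            rcases hp : pvStrScan r with ⟨tk', o'⟩
            rw [hp] at heq
            injection heq with h1 h2
            subst h1
            subst h2
            rw [hfold, IH2 tk' hp]
            simp

-- the two delimiter predicates coincide definitionally
theorem pvBreakEq : pvIsBreakB = pvIsDelimA := rfl

-- main equivalence: B's fold over the suffix from i equals A's loop from i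
theorem pvMain (cs : List Char) (i : Nat) (toks : List String) (hi : i ≤ cs.length) :
    pvFinishB ((cs.drop i).foldl pvStepB (toks, .normal, [])) = pvLoopA cs cs.length i toks := by
  by_cases h : i < cs.length
  · have hdrop : cs.drop i = cs[i] :: cs.drop (i + 1) := List.drop_eq_getElem_cons h
    have hgd : cs.getD i ' ' = cs[i] := pvGetD cs i h
    by_cases hc : cs[i] = '#'
    · -- comment branch
      have hA : pvLoopA cs cs.length i toks
          = pvLoopA cs cs.length (pvSkipCommentA cs cs.length i) toks := by
        rw [pvLoopA, dif_pos h]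
        simp only [hgd, hc]
        rw [dif_pos (by decide)]
      set k := pvSkipCommentA cs cs.length i with hk
      have hkspec := pvSkipCommentA_spec cs i
      have hsk : k = i + 1 + ((cs.drop (i + 1)).takeWhile (fun c => c != '\n')).length := by
        rw [hk, hkspec, hdrop, List.takeWhile_cons, if_pos (by simp [hc])]
        simp
        omega
      have hdk : (cs.drop (i + 1)).dropWhile (fun c => c != '\n') = cs.drop k := by
        rw [← pvDropTW (fun c => c != '\n') (cs.drop (i + 1)), List.drop_drop]
        congr 1
        omega
      have hB : (cs.drop i).foldl pvStepB (toks, .normal, []) =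
          (cs.drop (i + 1)).foldl pvStepB (toks, .comment, []) := by
        rw [hdrop]
        simp [pvStepB, pvNormalB, hc]
      have hcf := pvCommentFold (cs.drop (i + 1)) toks []
      rcases hdw : (cs.drop (i + 1)).dropWhile (fun c => c != '\n') with _ | ⟨d, r⟩ <;>
        rw [hdw] at hcf
      · -- comment runs to end of input
        have hcf' : (cs.drop (i + 1)).foldl pvStepB (toks, PvSt.comment, [])
            = (toks, PvSt.comment, []) := hcf
        have hklen : cs.length ≤ k := by
          have h1 : cs.drop k = [] := by rw [← hdk, hdw]
          have := List.drop_eq_nil_iff.mp h1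
          omega
        rw [hB, hcf', hA, pvLoopA, dif_neg (by omega)]
        simp [pvFinishB]
      · -- comment ends at a newline at position k
        have hcf' : (cs.drop (i + 1)).foldl pvStepB (toks, PvSt.comment, [])
            = r.foldl pvStepB (toks, PvSt.normal, []) := hcf
        have hkd : cs.drop k = d :: r := by rw [← hdk, hdw]
        have hklt : k < cs.length := by
          by_contra hcon
          rw [List.drop_eq_nil_iff.mpr (by omega)] at hkd
          cases hkd
        have hdnl : d = '\n' := by
          have := pvHeadDW (fun c => c != '\n') (cs.drop (i + 1)) d r hdw
          simpa using this
        have hck : cs[k] = '\n' := by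
          have h2 := List.drop_eq_getElem_cons hklt
          rw [hkd] at h2
          injection h2 with h3 _
          rw [← h3, hdnl]
        have hr : r = cs.drop (k + 1) := by
          have h2 := List.drop_eq_getElem_cons hklt
          rw [hkd] at h2
          injection h2 with _ h3
          try exact h3
        have hA2 : pvLoopA cs cs.length k toks = pvLoopA cs cs.length (k + 1) toks := by
          rw [pvLoopA, dif_pos hklt]
          simp only [pvGetD cs k hklt, hck]
          rw [dif_neg (by decide), if_neg (by decide), if_pos (by decide)]
        rw [hB, hcf', hA, hA2, hr]
        exact pvMain cs (k + 1) toks (by omega)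
    · by_cases hq : cs[i] = '"'
      · -- quoted-string branch
        set j := pvScanStringA cs cs.length (i + 1) with hj
        have hA : pvLoopA cs cs.length i toks
            = pvLoopA cs cs.length j (toks ++ [String.mk ((cs.drop i).take (j - i))]) := by
          rw [pvLoopA, dif_pos h]
          simp only [hgd, hq, hc]
          rw [dif_neg (by simp [hc]), if_pos (by decide)]
        have hB : (cs.drop i).foldl pvStepB (toks, .normal, []) =
            (cs.drop (i + 1)).foldl pvStepB (toks, .string, ['"']) := by
          rw [hdrop, hq]
          simp [pvStepB, pvNormalB]
        obtain ⟨hS1, hS2⟩ := pvScanStringA_spec cs (i + 1) (by omega)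
        obtain ⟨hF1, hF2⟩ := pvStringFold (cs.drop (i + 1)).length (cs.drop (i + 1)) (le_refl _) toks ['"']
        rcases hss : pvStrScan (cs.drop (i + 1)) with ⟨tk, o⟩
        rcases o with _ | rest
        · -- unterminated string: token runs to end of text
          obtain ⟨hge, htk⟩ := hS2 tk hss
          have htok : (cs.drop i).take (j - i) = cs.drop i := by
            apply List.take_of_length_le
            simp
            omega
          rw [hB, hF2 tk hss, hA, pvLoopA, dif_neg (by omega), htok, hdrop, htk, hq]
          simp
        · -- closed string
          obtain ⟨hlen, happ⟩ := hS1 tk rest hss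
          have hjlen : j ≤ cs.length := by
            have h1 : tk.length + rest.length = (cs.drop (i + 1)).length := by
              rw [← happ]; simp
            simp at h1
            omega
          have hrest : rest = cs.drop j := by
            have h1 : (tk ++ rest).drop tk.length = rest := by simp
            rw [happ] at h1
            rw [← h1, List.drop_drop]
            congr 1
            omega
          have htok : (cs.drop i).take (j - i) = '"' :: tk := by
            rw [hdrop, ← happ, hq]
            have h2 : j - i = tk.length + 1 := by omega
            rw [h2, List.take_succ_cons]
            congr 1
            exact pvTakeApp tk rest
          rw [hB, hF1 tk rest hss, hA, htok, hrest]
          have hrec := pvMain cs j (toks ++ [String.mk ('"' :: tk)]) hjlen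
          simpa using hrec
      · by_cases hws : pvIsWsA cs[i] = true
        · -- whitespace branch
          have hA : pvLoopA cs cs.length i toks = pvLoopA cs cs.length (i + 1) toks := by
            rw [pvLoopA, dif_pos h]
            simp only [hgd]
            rw [dif_neg (by simp [hc]), if_neg (by simp [hq]), if_pos hws]
          have hB : (cs.drop i).foldl pvStepB (toks, .normal, []) =
              (cs.drop (i + 1)).foldl pvStepB (toks, .normal, []) := by
            rw [hdrop]
            simp only [List.foldl_cons, pvStepB, pvNormalB]
            rw [if_neg (by simp [hc]), if_neg (by simp [hq]), if_pos (by exact hws)]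
          rw [hB, hA]
          exact pvMain cs (i + 1) toks (by omega)
        · by_cases hst : pvIsStructA cs[i] = true
          · -- structural character branch
            have hA : pvLoopA cs cs.length i toks
                = pvLoopA cs cs.length (i + 1) (toks ++ [String.mk [cs[i]]]) := by
              rw [pvLoopA, dif_pos h]
              simp only [hgd]
              rw [dif_neg (by simp [hc]), if_neg (by simp [hq]), if_neg (by exact hws),
                dif_pos hst]
            have hB : (cs.drop i).foldl pvStepB (toks, .normal, []) =
                (cs.drop (i + 1)).foldl pvStepB (toks ++ [String.mk [cs[i]]], .normal, []) := by
              rw [hdrop]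
              simp only [List.foldl_cons, pvStepB, pvNormalB]
              rw [if_neg (by simp [hc]), if_neg (by simp [hq]), if_neg (by exact hws),
                if_pos (by exact hst)]
            rw [hB, hA]
            exact pvMain cs (i + 1) (toks ++ [String.mk [cs[i]]]) (by omega)
          · -- bare-token branch
            have hnd : pvIsDelimA cs[i] = false := by
              rw [Bool.eq_false_iff]
              simp only [ne_eq, pvIsDelimA, Bool.or_eq_true, beq_iff_eq]
              simp only [pvIsWsA, pvIsStructA, Bool.or_eq_true, beq_iff_eq] at hws hst
              tauto
            set j := pvScanBareA cs cs.length i with hj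
            have hjs := pvScanBareA_spec cs i
            have htw : (cs.drop i).takeWhile (fun c => !pvIsDelimA c)
                = cs[i] :: (cs.drop (i + 1)).takeWhile (fun c => !pvIsDelimA c) := by
              rw [hdrop, List.takeWhile_cons, if_pos (by simp [hnd])]
            have hsj : j = i + 1 + ((cs.drop (i + 1)).takeWhile (fun c => !pvIsDelimA c)).length := by
              rw [hj, hjs, htw]
              simp
              omega
            have htokl : j - i = ((cs.drop i).takeWhile (fun c => !pvIsDelimA c)).length := by
              have h1 : j = i + ((cs.drop i).takeWhile (fun c => !pvIsDelimA c)).length :=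
                hj.trans hjs
              omega
            have htok : (cs.drop i).take (j - i)
                = (cs.drop i).takeWhile (fun c => !pvIsDelimA c) := by
              rw [htokl, pvTakeTW]
            have hA : pvLoopA cs cs.length i toks
                = pvLoopA cs cs.length j (toks ++ [String.mk ((cs.drop i).take (j - i))]) := by
              rw [pvLoopA, dif_pos h]
              simp only [hgd]
              rw [dif_neg (by simp [hc]), if_neg (by simp [hq]), if_neg (by exact hws),
                dif_neg (by exact hst)]
            have hB : (cs.drop i).foldl pvStepB (toks, .normal, []) =
                (cs.drop (i + 1)).foldl pvStepB (toks, .bare, [cs[i]]) := by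
              rw [hdrop]
              simp only [List.foldl_cons, pvStepB, pvNormalB]
              rw [if_neg (by simp [hc]), if_neg (by simp [hq]), if_neg (by exact hws),
                if_neg (by exact hst)]
              simp
            have hdk : (cs.drop (i + 1)).dropWhile (fun c => !pvIsDelimA c) = cs.drop j := by
              rw [← pvDropTW (fun c => !pvIsDelimA c) (cs.drop (i + 1)), List.drop_drop]
              congr 1
              omega
            have hbare := pvBareFold (cs.drop (i + 1)) toks [cs[i]]
            rw [pvBreakEq] at hbare
            rcases hdw : (cs.drop (i + 1)).dropWhile (fun c => !pvIsDelimA c) with _ | ⟨d, r⟩ <;>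
              rw [hdw] at hbare
            · -- bare token runs to end of input
              have hbare' : pvFinishB ((cs.drop (i + 1)).foldl pvStepB (toks, PvSt.bare, [cs[i]]))
                  = toks ++ [String.mk ([cs[i]] ++ cs.drop (i + 1))] := hbare
              have hjlen : cs.length ≤ j := by
                have h1 : cs.drop j = [] := by rw [← hdk, hdw]
                have := List.drop_eq_nil_iff.mp h1
                omega
              have htwall : (cs.drop (i + 1)).takeWhile (fun c => !pvIsDelimA c)
                  = cs.drop (i + 1) := pvTWofDWnil _ _ hdw
              rw [hB, hbare', hA, pvLoopA, dif_neg (by omega), htok, htw, htwall]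
              simp
            · -- bare token ends at a delimiter at position j
              have hbare' : (cs.drop (i + 1)).foldl pvStepB (toks, PvSt.bare, [cs[i]]) =
                  (d :: r).foldl pvStepB
                    (toks ++ [String.mk ([cs[i]] ++
                      (cs.drop (i + 1)).takeWhile (fun c => !pvIsDelimA c))],
                      PvSt.normal, []) := hbare
              have hjd : cs.drop j = d :: r := by rw [← hdk, hdw]
              have hjlt : j < cs.length := by
                by_contra hcon
                rw [List.drop_eq_nil_iff.mpr (by omega)] at hjd
                cases hjd
              have hrec := pvMain cs j
                (toks ++ [String.mk (cs[i] ::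
                  (cs.drop (i + 1)).takeWhile (fun c => !pvIsDelimA c))]) (by omega)
              rw [hjd] at hrec
              rw [hB, hbare', hA, htok, htw]
              simpa using hrec
  · have hieq : cs.drop i = [] := by rw [List.drop_eq_nil_iff]; omega
    rw [hieq, pvLoopA, dif_neg h]
    simp [pvFinishB]
termination_by cs.length - i

-- ===== VERDICT (by name: the statement is the Claim_ definition above) =====
theorem tokenizeClassic_py_spec : Claim_equal_tokenizeClassic_py := by
  intro text _
  unfold Spec_tokenizeClassic_py tokenizeClassic_py tokenizeClassic_py_alt
  have h := pvMain text.toList 0 [] (Nat.zero_le _)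
  simpa using h.symm
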